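-- pv_equiv track=rewrite | github.com/MihiranPiyarathna/Prototypes-main | coderbyte Longest Word.py | LongestWord_sol
-- ===== SOURCE A (Python) =====
-- def LongestWord_sol(sen):
--     nw = ""
--     for letter in sen:
--       if letter.isalpha() or letter.isnumeric():
--         nw += letter
--       else :
--         nw += " "
--     return max(nw.split(),key=len)
-- ===== SOURCE B (Python) =====
-- def LongestWord_sol(sen):
--     best = ""
--     cur = ""
--     for ch in sen:
--         if ch.isalnum():
--             cur += ch
--         else:
--             if len(cur) > len(best):
--                 best = cur
--             cur = ""
--     if len(cur) > len(best):
--         best = cur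
--     return best
-- ===== Notes on version B (the rewrite author's own statement) =====
-- stated objective: simpler
-- what changed: B replaces A's three-stage pipeline (rebuild the string with separators mapped to spaces, split it, take max by length) with a single streaming pass keeping the current run and the best word, with no intermediate string or word list; Pre_ excludes inputs with no alphanumeric character, on which A's max() raises ValueError.
import Mathlib
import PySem

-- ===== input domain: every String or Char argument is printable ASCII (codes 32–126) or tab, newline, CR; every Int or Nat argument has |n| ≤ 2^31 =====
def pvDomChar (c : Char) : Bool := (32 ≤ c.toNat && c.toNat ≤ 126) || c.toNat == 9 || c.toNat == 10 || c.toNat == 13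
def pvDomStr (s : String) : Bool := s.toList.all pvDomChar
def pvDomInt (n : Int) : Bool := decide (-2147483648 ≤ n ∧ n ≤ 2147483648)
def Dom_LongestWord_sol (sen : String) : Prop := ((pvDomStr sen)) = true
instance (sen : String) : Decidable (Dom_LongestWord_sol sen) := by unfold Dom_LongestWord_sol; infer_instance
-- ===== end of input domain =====

-- B replaces A's map-to-spaces / split / max-by-len pipeline with a single streaming
-- pass keeping the current run and the best-so-far word (simpler; same O(n) cost).


-- ===== PORT A =====
-- letter.isnumeric() coincides with isdigit on the printable-ASCII domain, so it is
-- ported as PySem.Chars.isdigit (exact on Dom).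
def LongestWord_sol (sen : String) : String :=
  let nw : List Char := sen.toList.foldl
    (fun acc letter =>
      if PySem.Chars.isalpha letter || PySem.Chars.isdigit letter
      then acc ++ [letter] else acc ++ [' ']) []
  match PySem.List.max? (PySem.Chars.split₀ nw) (fun w => PySem.Chars.len w) with
  | some w => String.mk w
  | none => ""   -- Python's max() raises ValueError here; excluded by Pre_

-- ===== PORT B =====
def LongestWord_sol_altGo : List Char → List Char → List Char → List Char
  | best, cur, [] => if cur.length > best.length then cur else best
  | best, cur, ch :: rest =>
    if PySem.Chars.isalnum ch then LongestWord_sol_altGo best (cur ++ [ch]) rest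
    else LongestWord_sol_altGo (if cur.length > best.length then cur else best) [] rest

def LongestWord_sol_alt (sen : String) : String :=
  String.mk (LongestWord_sol_altGo [] [] sen.toList)

-- ===== PRECONDITION & SPEC =====
-- Pre_ excludes exactly the strings with no alphanumeric character: there A's
-- max() is applied to an empty word list and raises ValueError.
def Pre_LongestWord_sol (sen : String) : Prop :=
  sen.toList.any PySem.Chars.isalnum = true
instance (sen : String) : Decidable (Pre_LongestWord_sol sen) := by
  unfold Pre_LongestWord_sol; infer_instance
def pvWitness_LongestWord_sol : String := "hello world"

def Spec_LongestWord_sol (sen : String) (out : String) : Prop := out = LongestWord_sol_alt sen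
instance (sen : String) (out : String) : Decidable (Spec_LongestWord_sol sen out) := by
  unfold Spec_LongestWord_sol; infer_instance

-- ===== CLAIM (what is proved, stated in full; the proofs are below) =====
def Claim_equal_LongestWord_sol : Prop :=
  ∀ (sen : String), Dom_LongestWord_sol sen → Pre_LongestWord_sol sen →
    Spec_LongestWord_sol sen (LongestWord_sol sen)
-- ===== LEMMAS AND PROOFS =====

-- the character translation A applies before splitting
def pvF (c : Char) : Char := if PySem.Chars.isalnum c then c else ' '

-- the maximal runs of alphanumeric characters of (cur ++ L), cur being a partial run
def pvRuns : List Char → List Char → List (List Char)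
  | cur, [] => if cur = [] then [] else [cur]
  | cur, c :: cs =>
    if PySem.Chars.isalnum c then pvRuns (cur ++ [c]) cs
    else if cur = [] then pvRuns [] cs else cur :: pvRuns [] cs

def pvStep (b w : List Char) : List Char := if w.length > b.length then w else b

theorem pv_alnum_not_space (c : Char) (h : PySem.Chars.isalnum c = true) :
    PySem.Chars.isspace c = false := by
  have hA : ('A' : Char).val.toNat = 65 := rfl
  have hZ : ('Z' : Char).val.toNat = 90 := rfl
  have ha : ('a' : Char).val.toNat = 97 := rfl
  have hz : ('z' : Char).val.toNat = 122 := rfl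
  have h0 : ('0' : Char).val.toNat = 48 := rfl
  have h9 : ('9' : Char).val.toNat = 57 := rfl
  have hc : c.toNat = c.val.toNat := rfl
  simp only [PySem.Chars.isalnum, PySem.Chars.isalpha, PySem.Chars.isdigit,
    PySem.Chars.isupper, PySem.Chars.islower, Bool.or_eq_true, Bool.and_eq_true,
    decide_eq_true_eq, Char.le_def, UInt32.le_iff_toNat_le, hA, hZ, ha, hz, h0, h9] at h
  simp only [PySem.Chars.isspace, Bool.or_eq_false_iff, Bool.and_eq_false_iff,
    decide_eq_false_iff_not, not_le]
  omega

theorem pv_foldl_append (L : List Char) (acc : List Char) :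
    L.foldl (fun a letter =>
        if PySem.Chars.isalpha letter || PySem.Chars.isdigit letter
        then a ++ [letter] else a ++ [' ']) acc = acc ++ L.map pvF := by
  induction L generalizing acc with
  | nil => simp
  | cons c cs ih =>
    by_cases h : PySem.Chars.isalpha c || PySem.Chars.isdigit c
    · rw [List.foldl_cons, if_pos h, ih]
      simp [pvF, PySem.Chars.isalnum, h]
    · have hb : PySem.Chars.isalpha c = false ∧ PySem.Chars.isdigit c = false := by
        simpa [Bool.or_eq_true] using h
      rw [List.foldl_cons, if_neg h, ih]
      simp [pvF, PySem.Chars.isalnum, hb.1, hb.2]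

theorem pv_split_go (L : List Char) (cur : List Char) (acc : List (List Char)) :
    PySem.Chars.split₀.go (L.map pvF) cur acc = acc.reverse ++ pvRuns cur.reverse L := by
  induction L generalizing cur acc with
  | nil =>
    by_cases h : cur = [] <;>
      simp [PySem.Chars.split₀.go, pvRuns, h, List.isEmpty_iff]
  | cons c cs ih =>
    by_cases h : PySem.Chars.isalnum c = true
    · have hs := pv_alnum_not_space c h
      simp [pvF, h, PySem.Chars.split₀.go, hs, pvRuns, ih]
    · have hb : PySem.Chars.isalnum c = false := by simpa using h
      by_cases hc : cur = []
      · simp [pvF, hb, PySem.Chars.split₀.go, hc, pvRuns, ih,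
          show PySem.Chars.isspace ' ' = true from by decide]
      · have : cur.isEmpty = false := by simpa [List.isEmpty_iff] using hc
        simp [pvF, hb, PySem.Chars.split₀.go, this, pvRuns, ih,
          show PySem.Chars.isspace ' ' = true from by decide,
          show cur.reverse ≠ [] from by simpa using hc]

theorem pv_alt_runs (L cur best : List Char) :
    LongestWord_sol_altGo best cur L = (pvRuns cur L).foldl pvStep best := by
  induction L generalizing cur best with
  | nil =>
    by_cases h : cur = [] <;>
      simp [LongestWord_sol_altGo, pvRuns, pvStep, h]
  | cons c cs ih =>
    by_cases h : PySem.Chars.isalnum c = true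
    · simp [LongestWord_sol_altGo, pvRuns, h, ih]
    · have hb : PySem.Chars.isalnum c = false := by simpa using h
      by_cases hc : cur = []
      · simp [LongestWord_sol_altGo, pvRuns, hb, hc, ih]
      · simp [LongestWord_sol_altGo, pvRuns, hb, hc, ih, pvStep]

theorem pv_runs_ne_nil_mem (L : List Char) :
    ∀ cur w, w ∈ pvRuns cur L → w ≠ [] := by
  induction L with
  | nil =>
    intro cur w hw
    by_cases h : cur = [] <;> simp [pvRuns, h] at hw
    · subst hw; exact h
  | cons c cs ih =>
    intro cur w hw
    by_cases h : PySem.Chars.isalnum c = true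
    · exact ih _ _ (by simpa [pvRuns, h] using hw)
    · have hb : PySem.Chars.isalnum c = false := by simpa using h
      by_cases hc : cur = []
      · exact ih _ _ (by simpa [pvRuns, hb, hc] using hw)
      · rcases (by simpa [pvRuns, hb, hc] using hw : w = cur ∨ w ∈ pvRuns [] cs) with h1 | h1
        · subst h1; exact hc
        · exact ih _ _ h1

theorem pv_runs_ne_nil (L : List Char) :
    ∀ cur, cur ≠ [] ∨ (∃ c ∈ L, PySem.Chars.isalnum c = true) → pvRuns cur L ≠ [] := by
  induction L with
  | nil =>
    intro cur hcur
    rcases hcur with h | h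
    · simp [pvRuns, h]
    · simp at h
  | cons c cs ih =>
    intro cur hcur
    by_cases h : PySem.Chars.isalnum c = true
    · simpa [pvRuns, h] using ih (cur ++ [c]) (Or.inl (by simp))
    · have hb : PySem.Chars.isalnum c = false := by simpa using h
      by_cases hc : cur = []
      · rcases hcur with h1 | h1
        · exact absurd hc h1
        · obtain ⟨d, hd, hda⟩ := h1
          rcases List.mem_cons.mp hd with rfl | hd
          · simp [hda] at hb
          · simpa [pvRuns, hb, hc] using ih [] (Or.inr ⟨d, hd, hda⟩)
      · simp [pvRuns, hb, hc]

def pvOptStep (acc : Option (List Char)) (x : List Char) : Option (List Char) :=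
  match acc with
  | none => some x
  | some m => if PySem.Chars.len m < PySem.Chars.len x then some x else some m

theorem pvOptStep_some (m x : List Char) : pvOptStep (some m) x = some (pvStep m x) := by
  simp only [pvOptStep, pvStep, PySem.Chars.len_eq, gt_iff_lt, Nat.cast_lt]
  split_ifs <;> rfl

theorem pv_foldl_funeq {α β : Type} (f g : β → α → β) (h : ∀ b a, f b a = g b a) :
    ∀ (l : List α) (b : β), List.foldl f b l = List.foldl g b l := by
  intro l
  induction l with
  | nil => intro b; rfl
  | cons x xs ih => intro b; rw [List.foldl_cons, List.foldl_cons, h, ih]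

theorem pv_opt_fold (t : List (List Char)) (m : List Char) :
    List.foldl pvOptStep (some m) t = some (t.foldl pvStep m) := by
  induction t generalizing m with
  | nil => rfl
  | cons x t ih => rw [List.foldl_cons, List.foldl_cons, pvOptStep_some, ih]

theorem LongestWord_sol_eq (sen : String) (hpre : Pre_LongestWord_sol sen) :
    LongestWord_sol sen = LongestWord_sol_alt sen := by
  unfold LongestWord_sol LongestWord_sol_alt
  have hnw : sen.toList.foldl
      (fun acc letter =>
        if PySem.Chars.isalpha letter || PySem.Chars.isdigit letter
        then acc ++ [letter] else acc ++ [' ']) []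
      = sen.toList.map pvF := by
    simpa using pv_foldl_append sen.toList []
  rw [hnw]
  show (match PySem.List.max? (PySem.Chars.split₀ (sen.toList.map pvF))
        (fun w => PySem.Chars.len w) with
    | some w => String.mk w
    | none => "") = String.mk (LongestWord_sol_altGo [] [] sen.toList)
  have hsplit : PySem.Chars.split₀ (sen.toList.map pvF) = pvRuns [] sen.toList := by
    simpa using pv_split_go sen.toList [] []
  rw [hsplit]
  have hne : pvRuns [] sen.toList ≠ [] := by
    apply pv_runs_ne_nil
    right
    simpa [Pre_LongestWord_sol, List.any_eq_true] using hpre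
  obtain ⟨w, t, hwt⟩ := List.exists_cons_of_ne_nil hne
  have hwne : w ≠ [] := pv_runs_ne_nil_mem sen.toList [] w (by rw [hwt]; simp)
  rw [hwt, pv_alt_runs]
  rw [hwt]
  have hfun : PySem.List.max? (w :: t) (fun x => PySem.Chars.len x)
      = List.foldl pvOptStep (some w) t := by
    simp only [PySem.List.max?, List.foldl_cons]
    exact pv_foldl_funeq _ pvOptStep (fun b a => by cases b <;> rfl) t _
  rw [hfun.trans (pv_opt_fold t w)]
  have hstep : pvStep [] w = w := by
    have hlen : 0 < w.length := List.length_pos_of_ne_nil hwne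
    simp [pvStep, hlen]
  simp [hstep, List.foldl_cons]

-- ===== VERDICT (by name: the statement is the Claim_ definition above) =====
theorem LongestWord_sol_spec : Claim_equal_LongestWord_sol := by
  intro sen _ hpre
  unfold Spec_LongestWord_sol
  exact LongestWord_sol_eq sen hpre
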